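-- pv_equiv track=rewrite | github.com/autopkg/dataJAR-recipes | *AutoPkg Linters/MunkiPathDeleterChecker/MunkiPathDeleterChecker.py | is_redundant_path
-- ===== SOURCE A (Python) =====
-- def normalize_path(path):
--     """Normalize a path for comparison.
--
--     Args:
--         path: Path string
--
--     Returns:
--         Normalized path with trailing slash
--     """
--     # Always end with / for directory comparison
--     if not path.endswith('/'):
--         path = path + '/'
--     return path
--
-- def is_redundant_path(path, existing_paths):
--     """Check if a path is redundant given existing paths.
--
--     A path is redundant if:
--     1. It's identical to an existing path (after normalization)
--     2. It's a child of an existing path (will be deleted with parent)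
--
--     Args:
--         path: Path to check
--         existing_paths: List of existing paths
--
--     Returns:
--         True if path is redundant
--     """
--     path_norm = normalize_path(path)
--
--     for existing in existing_paths:
--         existing_norm = normalize_path(existing)
--
--         # Same path (after normalization)
--         if path_norm == existing_norm:
--             return True
--
--         # Child of existing path
--         if path_norm.startswith(existing_norm):
--             return True
--
--     return False
-- ===== SOURCE B (Python) =====
-- def is_redundant_path(path, existing_paths):
--     """Check if a path is redundant given existing paths.
--
--     Single scan over the query: build a set of the normalized existing
--     paths once, then walk the normalized query left to right, testing
--     each '/'-terminated prefix (including the whole query) for set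
--     membership.
--     """
--     path_norm = path if path.endswith('/') else path + '/'
--     existing_set = {e if e.endswith('/') else e + '/' for e in existing_paths}
--     prefix = ''
--     for ch in path_norm:
--         prefix += ch
--         if ch == '/' and prefix in existing_set:
--             return True
--     return False
-- ===== Notes on version B (the rewrite author's own statement) =====
-- stated objective: alternative
-- what changed: Instead of scanning every existing path and calling startswith on each, B builds a set of the normalized existing paths once and walks the normalized query once, testing each '/'-terminated prefix for set membership.
import Mathlib
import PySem

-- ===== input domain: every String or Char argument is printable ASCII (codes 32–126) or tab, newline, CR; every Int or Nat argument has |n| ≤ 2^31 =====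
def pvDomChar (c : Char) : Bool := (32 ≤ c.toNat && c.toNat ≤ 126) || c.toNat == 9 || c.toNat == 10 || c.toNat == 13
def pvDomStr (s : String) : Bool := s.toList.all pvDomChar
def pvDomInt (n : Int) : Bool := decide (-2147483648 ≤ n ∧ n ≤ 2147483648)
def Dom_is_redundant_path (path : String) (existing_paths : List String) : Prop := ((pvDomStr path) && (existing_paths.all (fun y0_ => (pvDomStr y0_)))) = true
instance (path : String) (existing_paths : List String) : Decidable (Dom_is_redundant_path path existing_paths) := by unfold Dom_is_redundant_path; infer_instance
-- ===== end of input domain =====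

-- B replaces A's scan of every existing path with startswith by one pass over the
-- normalized query against a set of normalized existing paths (objective: alternative).


-- ===== PORT A =====
-- normalize_path (shared by both sources verbatim): append '/' unless already present
def pvNormalize (p : List Char) : List Char :=
  if PySem.Chars.endswith p ['/'] then p else p ++ ['/']

-- the for-loop over existing_paths with its two early returns
def pvLoopA (pn : List Char) : List String → Bool
  | [] => false
  | e :: rest =>
    let en := pvNormalize e.toList
    if pn == en then true
    else if PySem.Chars.startswith pn en then true
    else pvLoopA pn rest

def is_redundant_path (path : String) (existing_paths : List String) : Bool :=
  pvLoopA (pvNormalize path.toList) existing_paths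

-- ===== PORT B =====
-- the for-loop over the characters of path_norm, growing prefix
def pvLoopB (eset : PySem.Set (List Char)) : List Char → List Char → Bool
  | _, [] => false
  | pre, c :: rest =>
    if c == '/' && PySem.Set.contains eset (pre ++ [c]) then true
    else pvLoopB eset (pre ++ [c]) rest

def is_redundant_path_alt (path : String) (existing_paths : List String) : Bool :=
  let pn := pvNormalize path.toList
  let eset := PySem.Set.ofList (existing_paths.map (fun e => pvNormalize e.toList))
  pvLoopB eset [] pn

-- ===== PRECONDITION & SPEC =====
def Spec_is_redundant_path (path : String) (existing_paths : List String) (out : Bool) : Prop := out = is_redundant_path_alt path existing_paths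
instance (path : String) (existing_paths : List String) (out : Bool) : Decidable (Spec_is_redundant_path path existing_paths out) := by unfold Spec_is_redundant_path; infer_instance

-- ===== CLAIM (what is proved, stated in full; the proofs are below) =====
def Claim_equal_is_redundant_path : Prop := ∀ (path : String) (existing_paths : List String), Dom_is_redundant_path path existing_paths → Spec_is_redundant_path path existing_paths (is_redundant_path path existing_paths)

-- ===== LEMMAS AND PROOFS =====

-- every normalized path ends in '/'
theorem pvNormalize_ends (p : List Char) : ∃ u, pvNormalize p = u ++ ['/'] := by
  unfold pvNormalize
  split
  · rename_i h
    simp only [PySem.Chars.endswith] at h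
    rw [List.isSuffixOf_iff_suffix] at h
    obtain ⟨u, hu⟩ := h
    exact ⟨u, hu.symm⟩
  · exact ⟨p, rfl⟩

-- A's loop returns true iff some normalized existing path is a prefix of pn
theorem pvLoopA_iff (pn : List Char) (es : List String) :
    pvLoopA pn es = true ↔ ∃ e ∈ es, (pvNormalize e.toList) <+: pn := by
  induction es with
  | nil => simp [pvLoopA]
  | cons e rest ih =>
    simp only [pvLoopA]
    by_cases heq : pn = pvNormalize e.toList
    · simp [heq]
    · have hbeq : (pn == pvNormalize e.toList) = false := by
        simpa using heq
      rw [hbeq]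
      simp only [Bool.false_eq_true, if_false]
      by_cases hpre : (pvNormalize e.toList) <+: pn
      · have : PySem.Chars.startswith pn (pvNormalize e.toList) = true := by
          simpa [PySem.Chars.startswith, List.isPrefixOf_iff_prefix] using hpre
        simp [this, hpre]
      · have : PySem.Chars.startswith pn (pvNormalize e.toList) = false := by
          simp only [PySem.Chars.startswith]
          rw [Bool.eq_false_iff, Ne, List.isPrefixOf_iff_prefix]
          exact hpre
        simp [this, ih, hpre]

-- B's loop returns true iff some '/'-terminated extension of pre within rest is in the set
theorem pvLoopB_iff (eset : PySem.Set (List Char)) (rest pre : List Char) :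
    pvLoopB eset pre rest = true ↔
      ∃ u v, rest = u ++ ['/'] ++ v ∧ (pre ++ u ++ ['/']) ∈ eset := by
  induction rest generalizing pre with
  | nil =>
    simp only [pvLoopB, Bool.false_eq_true, false_iff]
    rintro ⟨u, v, h, -⟩
    exact absurd h (by simp)
  | cons c rest ih =>
    simp only [pvLoopB]
    split
    · rename_i h
      simp only [Bool.and_eq_true, beq_iff_eq, PySem.Set.contains, List.contains_iff_mem] at h
      obtain ⟨hc, hmem⟩ := h
      subst hc
      simp only [true_iff]
      exact ⟨[], rest, by simp, by simpa using hmem⟩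
    · rename_i h
      rw [ih]
      constructor
      · rintro ⟨u, v, hr, hm⟩
        exact ⟨c :: u, v, by simp [hr], by simpa using hm⟩
      · rintro ⟨u, v, hr, hm⟩
        cases u with
        | nil =>
          exfalso
          simp only [List.nil_append, List.cons_append, List.cons.injEq] at hr
          obtain ⟨hc, -⟩ := hr
          subst hc
          apply h
          simp only [Bool.and_eq_true, beq_self_eq_true, true_and,
            PySem.Set.contains, List.contains_iff_mem]
          simpa using hm
        | cons c' u' =>
          simp only [List.cons_append, List.cons.injEq] at hr
          obtain ⟨hc, hr⟩ := hr
          subst hc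
          exact ⟨u', v, hr, by simpa [List.append_assoc] using hm⟩

theorem is_redundant_path_spec : Claim_equal_is_redundant_path := by
  intro path existing_paths _
  unfold Spec_is_redundant_path
  unfold is_redundant_path is_redundant_path_alt
  set pn := pvNormalize path.toList with hpn
  set eset := PySem.Set.ofList (existing_paths.map (fun e => pvNormalize e.toList)) with hes
  have hmem : ∀ q, q ∈ eset ↔ ∃ e ∈ existing_paths, pvNormalize e.toList = q := by
    intro q
    rw [hes, PySem.Set.mem_ofList]
    simp [eq_comm]
  rw [Bool.eq_iff_iff, pvLoopA_iff, pvLoopB_iff]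
  constructor
  · rintro ⟨e, he, hpre⟩
    obtain ⟨u, hu⟩ := pvNormalize_ends e.toList
    obtain ⟨v, hv⟩ := hpre
    rw [hu] at hv
    refine ⟨u, v, by simp [← hv], ?_⟩
    rw [hmem]
    exact ⟨e, he, by simp [hu]⟩
  · rintro ⟨u, v, hr, hm⟩
    rw [hmem] at hm
    obtain ⟨e, he, hne⟩ := hm
    refine ⟨e, he, ?_⟩
    rw [hne]
    exact ⟨v, by simp [hr]⟩
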